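-- pv_equiv track=rewrite | github.com/cseriildi/Cloudflight-Coding-Contest | Room_Planner/level2/level2.py | room_planner
-- ===== SOURCE A (Python) =====
-- def	room_planner(width, length):
-- 	room = ""
-- 	room_index = 1
--
-- 	for _ in range(length):
-- 		line = []
-- 		for _ in range(0, width, 3):
-- 			line.append(str(room_index))
-- 			line.append(str(room_index))
-- 			line.append(str(room_index))
-- 			room_index += 1
-- 		room += ' '.join(line)
-- 		room += "\n"
--
-- 	return room
-- ===== SOURCE B (Python) =====
-- def room_planner(width, length):
--     ngroups = (width + 2) // 3 if width > 0 else 0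
--     rows = max(length, 0)
--     if ngroups == 0:
--         return "\n" * rows
--     per = 3 * ngroups
--     flat = [str(k) for k in range(1, rows * ngroups + 1) for _ in range(3)]
--     return ''.join(' '.join(flat[i * per:(i + 1) * per]) + "\n" for i in range(rows))
-- ===== Notes on version B (the rewrite author's own statement) =====
-- stated objective: alternative
-- what changed: B computes the group count arithmetically, generates one flat list of all room labels in a single comprehension, and reshapes it into rows by slicing and joining, instead of A's interleaved nested loops with a running counter and per-group triple appends.
import Mathlib
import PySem

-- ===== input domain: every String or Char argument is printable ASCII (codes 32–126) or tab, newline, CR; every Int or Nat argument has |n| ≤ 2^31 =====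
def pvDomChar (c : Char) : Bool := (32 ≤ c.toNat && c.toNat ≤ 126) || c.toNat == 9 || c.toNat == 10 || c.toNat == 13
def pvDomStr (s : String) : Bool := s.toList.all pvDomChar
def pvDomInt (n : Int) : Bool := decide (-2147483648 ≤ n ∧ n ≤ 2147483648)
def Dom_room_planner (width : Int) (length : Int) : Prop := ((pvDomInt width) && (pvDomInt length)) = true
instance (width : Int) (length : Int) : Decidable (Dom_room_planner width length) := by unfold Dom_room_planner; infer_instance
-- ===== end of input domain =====

-- B replaces A's interleaved append-three-and-increment counter by generating one flat list of
-- all room labels and reshaping it into rows by slicing (objective: alternative decomposition).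

-- ===== PORT A =====
def room_planner (width : Int) (length : Int) : String :=
  ((PySem.List.pyRange 0 length 1).foldl
    (fun (st : String × Int) _ =>
      let inner := (PySem.List.pyRange 0 width 3).foldl
        (fun (p : List String × Int) _ =>
          (p.1 ++ [PySem.Int.toStr p.2] ++ [PySem.Int.toStr p.2] ++ [PySem.Int.toStr p.2],
           p.2 + 1))
        ([], st.2)
      ((st.1 ++ PySem.Str.join " " inner.1) ++ "\n", inner.2))
    ("", 1)).1

-- ===== PORT B =====
def room_planner_alt (width : Int) (length : Int) : String :=
  let ngroups : Int := if 0 < width then PySem.Int.floordiv (width + 2) 3 else 0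
  let rows : Int := max length 0
  if ngroups = 0 then
    -- hand port of '"\n" * rows': exact because rows ≥ 0
    PySem.Str.join "" (List.replicate rows.toNat "\n")
  else
    let per : Int := 3 * ngroups
    let flat : List String :=
      (PySem.List.pyRange 1 (rows * ngroups + 1) 1).flatMap
        (fun k => List.replicate 3 (PySem.Int.toStr k))
    PySem.Str.join ""
      ((PySem.List.pyRange 0 rows 1).map
        (fun i =>
          PySem.Str.join " " (PySem.List.slice flat (some (i * per)) (some ((i + 1) * per)))
            ++ "\n"))

-- ===== PRECONDITION & SPEC =====
def Spec_room_planner (width : Int) (length : Int) (out : String) : Prop := out = room_planner_alt width length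
instance (width : Int) (length : Int) (out : String) : Decidable (Spec_room_planner width length out) := by unfold Spec_room_planner; infer_instance

-- ===== CLAIM (what is proved, stated in full; the proofs are below) =====
def Claim_equal_room_planner : Prop := ∀ (width : Int) (length : Int), Dom_room_planner width length → Spec_room_planner width length (room_planner width length)

-- ===== LEMMAS AND PROOFS =====

/-- One row's list of labels: `n` groups of three, first group numbered `i`. -/
def lineOf (i : Int) : Nat → List String
  | 0 => []
  | n+1 => List.replicate 3 (PySem.Int.toStr i) ++ lineOf (i+1) n

/-- The whole grid: `R` rows of `G` groups, numbering starting at `i`. -/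
def rowsStr (G : Nat) (i : Int) : Nat → String
  | 0 => ""
  | R+1 => ((PySem.Str.join " " (lineOf i G)) ++ "\n") ++ rowsStr G (i+G) R

lemma str_join_nil (sep : String) : PySem.Str.join sep [] = "" := by
  apply String.toList_inj.mp
  simp [PySem.Str.toList_join, PySem.Chars.join_nil]

lemma str_join_empty_cons (a : String) (l : List String) :
    PySem.Str.join "" (a :: l) = a ++ PySem.Str.join "" l := by
  apply String.toList_inj.mp
  cases l with
  | nil => simp [PySem.Str.toList_join, PySem.Chars.join_singleton, PySem.Chars.join_nil]
  | cons b t => simp [PySem.Str.toList_join, PySem.Chars.join_cons_cons]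

lemma innerA (line : List String) (i : Int) (l : List Int) :
    l.foldl (fun (p : List String × Int) _ =>
        (p.1 ++ [PySem.Int.toStr p.2] ++ [PySem.Int.toStr p.2] ++ [PySem.Int.toStr p.2],
         p.2 + 1)) (line, i)
      = (line ++ lineOf i l.length, i + l.length) := by
  induction l generalizing line i with
  | nil => simp [lineOf]
  | cons x t ih =>
      simp only [List.foldl_cons, List.length_cons, ih, lineOf]
      refine Prod.ext ?_ ?_
      · simp [List.replicate]
      · push_cast; ring

lemma outerA (G : Nat) (room : String) (i : Int) (l : List Int) :
    l.foldl (fun (st : String × Int) _ =>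
        ((st.1 ++ PySem.Str.join " " (lineOf st.2 G)) ++ "\n", st.2 + G)) (room, i)
      = (room ++ rowsStr G i l.length, i + l.length * G) := by
  induction l generalizing room i with
  | nil => simp [rowsStr]
  | cons x t ih =>
      simp only [List.foldl_cons, List.length_cons, ih, rowsStr]
      refine Prod.ext ?_ ?_
      · simp [String.append_assoc]
      · push_cast; ring

lemma room_planner_eq_rowsStr (width length : Int) :
    room_planner width length
      = rowsStr (PySem.List.pyRange 0 width 3).length 1 length.toNat := by
  unfold room_planner
  have hf : (fun (st : String × Int) (_ : Int) =>
      let inner := (PySem.List.pyRange 0 width 3).foldl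
        (fun (p : List String × Int) _ =>
          (p.1 ++ [PySem.Int.toStr p.2] ++ [PySem.Int.toStr p.2] ++ [PySem.Int.toStr p.2],
           p.2 + 1))
        ([], st.2)
      ((st.1 ++ PySem.Str.join " " inner.1) ++ "\n", inner.2))
      = (fun (st : String × Int) _ =>
        ((st.1 ++ PySem.Str.join " " (lineOf st.2 (PySem.List.pyRange 0 width 3).length)) ++ "\n",
          st.2 + (PySem.List.pyRange 0 width 3).length)) := by
    funext st _
    rw [innerA]
    simp
  rw [hf, outerA]
  simp [PySem.List.length_pyRange_one]
lemma rowsStr_zero_groups (i : Int) (R : Nat) :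
    rowsStr 0 i R = PySem.Str.join "" (List.replicate R "\n") := by
  induction R generalizing i with
  | zero => simp [rowsStr, str_join_nil]
  | succ R ih =>
      simp only [rowsStr, lineOf, List.replicate, str_join_empty_cons, str_join_nil, ih]
      simp

lemma flat_drop (ks : List Int) (m : Nat) :
    (ks.flatMap (fun k => List.replicate 3 (PySem.Int.toStr k))).drop (3*m)
      = (ks.drop m).flatMap (fun k => List.replicate 3 (PySem.Int.toStr k)) := by
  induction ks generalizing m with
  | nil => simp
  | cons x t ih =>
      cases m with
      | zero => simp
      | succ m =>
          have h3 : 3*(m+1) = 3*m+1+1+1 := by omega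
          simp only [h3, List.flatMap_cons, List.replicate, List.cons_append, List.nil_append,
            List.drop_succ_cons]
          simpa using ih m

lemma flat_take (ks : List Int) (m : Nat) :
    (ks.flatMap (fun k => List.replicate 3 (PySem.Int.toStr k))).take (3*m)
      = (ks.take m).flatMap (fun k => List.replicate 3 (PySem.Int.toStr k)) := by
  induction ks generalizing m with
  | nil => simp
  | cons x t ih =>
      cases m with
      | zero => simp
      | succ m =>
          have h3 : 3*(m+1) = 3*m+1+1+1 := by omega
          simp only [h3, List.flatMap_cons, List.replicate, List.cons_append, List.nil_append,
            List.take_succ_cons]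
          simpa using ih m

lemma pyRange_drop (a : Int) (n m : Nat) (h : m ≤ n) :
    (PySem.List.pyRange a (a+(n:Int)) 1).drop m = PySem.List.pyRange (a+(m:Int)) (a+(n:Int)) 1 := by
  rw [PySem.List.pyRange_one_append a (a+(m:Int)) (a+(n:Int)) (by omega) (by omega)]
  rw [List.drop_append_of_le_length (by simp [PySem.List.length_pyRange_one])]
  simp [PySem.List.length_pyRange_one]

lemma pyRange_take (a : Int) (n m : Nat) (h : m ≤ n) :
    (PySem.List.pyRange a (a+(n:Int)) 1).take m = PySem.List.pyRange a (a+(m:Int)) 1 := by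
  rw [PySem.List.pyRange_one_append a (a+(m:Int)) (a+(n:Int)) (by omega) (by omega)]
  rw [List.take_append_of_le_length (by simp [PySem.List.length_pyRange_one])]
  simp [PySem.List.length_pyRange_one]

lemma lineOf_eq (n : Nat) : ∀ i : Int, lineOf i n
    = (PySem.List.pyRange i (i+(n:Int)) 1).flatMap (fun k => List.replicate 3 (PySem.Int.toStr k)) := by
  induction n with
  | zero => intro i; simp [lineOf, PySem.List.pyRange_one_eq_nil]
  | succ n ih =>
      intro i
      rw [PySem.List.pyRange_one_cons (by omega)]
      have : i + ((n:Int)+1) = (i+1) + (n:Int) := by ring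
      simp only [lineOf, List.flatMap_cons, Nat.cast_add, Nat.cast_one, this, ← ih]

lemma joinRows (G : Nat) : ∀ (R : Nat) (i : Int),
    PySem.Str.join "" ((List.range R).map
        (fun (j : Nat) => PySem.Str.join " " (lineOf (i + (j:Int)*(G:Int)) G) ++ "\n"))
      = rowsStr G i R := by
  intro R
  induction R with
  | zero => intro i; simp [rowsStr, str_join_nil]
  | succ R ih =>
      intro i
      rw [List.range_succ_eq_map]
      simp only [List.map_cons, List.map_map, str_join_empty_cons, rowsStr]
      have hmap : ((List.range R).map
          ((fun j : Nat => PySem.Str.join " " (lineOf (i + (j:Int)*(G:Int)) G) ++ "\n") ∘ Nat.succ))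
          = (List.range R).map
            (fun (j : Nat) => PySem.Str.join " " (lineOf ((i+(G:Int)) + (j:Int)*(G:Int)) G) ++ "\n") := by
        apply List.map_congr_left
        intro j _
        have : i + ((j:Int)+1)*(G:Int) = (i+(G:Int)) + (j:Int)*(G:Int) := by ring
        simp [Function.comp, Nat.succ_eq_add_one, this]
      rw [hmap, ih]
      simp [String.append_assoc]

lemma room_planner_alt_eq (width length : Int) :
    room_planner_alt width length
      = rowsStr (PySem.List.pyRange 0 width 3).length 1 length.toNat := by
  unfold room_planner_alt
  by_cases h : 0 < width
  · -- positive width: the slicing branch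
    have hG : (PySem.List.pyRange 0 width 3).length = ((width+2)/3).toNat := by
      rw [PySem.List.pyRange_of_pos 0 width (by omega)]
      simp [h]
      congr 1
      omega
    set G : Nat := ((width+2)/3).toNat with hGdef
    have hGpos : 0 < G := by
      have : 1 ≤ (width+2)/3 := by omega
      omega
    have hng : (if 0 < width then PySem.Int.floordiv (width + 2) 3 else 0) = (G:Int) := by
      simp [h, PySem.Int.floordiv, Int.fdiv_eq_ediv]
      omega
    set R : Nat := length.toNat with hRdef
    have hrows : max length 0 = (R:Int) := by omega
    rw [hng, hrows, hG]
    have hne : ¬ ((G:Int) = 0) := by omega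
    rw [if_neg hne]
    have hflat : PySem.List.pyRange 1 ((R:Int)*(G:Int)+1) 1
        = PySem.List.pyRange 1 (1 + ((R*G : Nat):Int)) 1 := by
      congr 1
      push_cast
      ring
    rw [hflat]
    rw [PySem.List.pyRange_one (0 : Int) (R:Int)]
    have hlen : ((R:Int) - 0).toNat = R := by omega
    rw [hlen]
    dsimp only
    rw [List.map_map]
    have hmap : ((List.range R).map ((fun i => PySem.Str.join " "
          (PySem.List.slice
            ((PySem.List.pyRange 1 (1 + ((R*G : Nat):Int)) 1).flatMap
              (fun k => List.replicate 3 (PySem.Int.toStr k)))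
            (some (i * (3*(G:Int)))) (some ((i + 1) * (3*(G:Int))))) ++ "\n")
          ∘ (fun k : Nat => (0:Int) + (k:Int))))
        = (List.range R).map
          (fun (j : Nat) => PySem.Str.join " " (lineOf (1 + (j:Int)*(G:Int)) G) ++ "\n") := by
      apply List.map_congr_left
      intro j hj
      have hjR : j < R := List.mem_range.mp hj
      have ha : ((0:Int) + (j:Int)) * (3*(G:Int)) = ((3*(j*G) : Nat) : Int) := by
        push_cast; ring
      have hb : ((0:Int) + (j:Int) + 1) * (3*(G:Int)) = ((3*(j*G) + 3*G : Nat) : Int) := by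
        push_cast; ring
      simp only [Function.comp, ha, hb, PySem.List.slice_natCast]
      have hsub : 3*(j*G) + 3*G - 3*(j*G) = 3*G := by omega
      rw [hsub, flat_drop]
      have hjG : j*G ≤ R*G := Nat.mul_le_mul_right G (le_of_lt hjR)
      have h1 : (1:Int) + ((R*G : Nat):Int) = 1 + ((j*G + (R*G - j*G) : Nat):Int) := by
        push_cast; omega
      rw [h1, pyRange_drop 1 (j*G + (R*G - j*G)) (j*G) (by omega)]
      rw [flat_take]
      have h2 : (1:Int) + ((j*G + (R*G - j*G) : Nat):Int)
          = (1 + ((j*G : Nat):Int)) + ((R*G - j*G : Nat):Int) := by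
        push_cast; omega
      have hj1 : j*G + G ≤ R*G := by
        have h4 := Nat.mul_le_mul_right G (Nat.succ_le_of_lt hjR)
        simpa [Nat.succ_mul] using h4
      rw [h2, pyRange_take (1 + ((j*G : Nat):Int)) (R*G - j*G) G (by omega)]
      rw [← lineOf_eq]
      have h3 : (1:Int) + ((j*G : Nat):Int) = 1 + (j:Int)*(G:Int) := by push_cast; ring
      rw [h3]
    rw [hmap, joinRows]
  · -- nonpositive width: zero groups, each row is just a newline
    have hG : (PySem.List.pyRange 0 width 3).length = 0 := by
      rw [PySem.List.pyRange_of_pos 0 width (by omega)]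
      simp
      omega
    have hng : (if 0 < width then PySem.Int.floordiv (width + 2) 3 else 0) = 0 := by
      simp [h]
    rw [hng, hG, if_pos rfl]
    have : (max length 0).toNat = length.toNat := by omega
    rw [this, rowsStr_zero_groups]

theorem room_planner_spec : Claim_equal_room_planner := by
  intro width length _
  unfold Spec_room_planner
  rw [room_planner_eq_rowsStr, room_planner_alt_eq]
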